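-- pv_equiv track=rewrite | github.com/BH1SCW/Leetcode-1 | Company/PureStorage/1.py | compute_number_score
-- ===== SOURCE A (Python) =====
-- from collections import deque
--
-- def compute_number_score(number):
--     digits = deque([])
--     score = 6 if number % 5 == 0 else 0  # rule 4
--     while number > 0:
--         digits.appendleft(number % 10)
--         number //= 10
--     prev, first_three, end_three, first_seq, end_seq = -1, 0, 0, 0, 0
--     for i in range(len(digits)):
--         d = digits[i]
--         if d == 5:
--             score += 2  # rule 1
--         if d % 2:
--             score += 1  # rule 5
--         if d == 3:  # rule 2
--             if prev != 3:
--                 first_three, end_three = i, i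
--             else:
--                 end_three = i
--         elif prev == 3:
--             score += max(0, (end_three - first_three) * 4)
--             first_three, end_three = i, i
--         else:
--             first_three, end_three = i, i
--         if i:
--             if d == prev + 1:
--                 end_seq = i
--             else:
--                 score += max(0, (end_seq - first_seq + 1) * (end_seq - first_seq  + 1))
--                 first_seq, end_seq = i, i
--         prev = d
--     score += max(0, (end_three - first_three) * 4)
--     score += max(0, (end_seq - first_seq + 1) * (end_seq - first_seq  + 1))
--     return score
-- ===== SOURCE B (Python) =====
-- def compute_number_score(number):
--     digits = []
--     n = number
--     while n > 0:
--         digits.append(n % 10)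
--         n //= 10
--     digits.reverse()
--     score = 6 if number % 5 == 0 else 0          # rule 4
--     score += 2 * digits.count(5)                 # rule 1
--     score += sum(d % 2 for d in digits)          # rule 5
--     score += 4 * sum(1 for a, b in zip(digits, digits[1:]) if a == 3 and b == 3)  # rule 2
--     run, total = 1, 0
--     for a, b in zip(digits, digits[1:]):
--         if b == a + 1:
--             run += 1
--         else:
--             total += run * run
--             run = 1
--     score += total + run * run                   # rule 3 (empty digit list: one phantom run of length 1)
--     return score
-- ===== Notes on version B (the rewrite author's own statement) =====
-- stated objective: simpler
-- what changed: Replaces A's single stateful pass with six loop variables tracking run boundaries by independent rule-wise passes: a count pass for the per-digit rules, a zip over adjacent digit pairs for the equal-run rule, and a run-length counter summing squared lengths of increasing runs.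
import Mathlib
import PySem

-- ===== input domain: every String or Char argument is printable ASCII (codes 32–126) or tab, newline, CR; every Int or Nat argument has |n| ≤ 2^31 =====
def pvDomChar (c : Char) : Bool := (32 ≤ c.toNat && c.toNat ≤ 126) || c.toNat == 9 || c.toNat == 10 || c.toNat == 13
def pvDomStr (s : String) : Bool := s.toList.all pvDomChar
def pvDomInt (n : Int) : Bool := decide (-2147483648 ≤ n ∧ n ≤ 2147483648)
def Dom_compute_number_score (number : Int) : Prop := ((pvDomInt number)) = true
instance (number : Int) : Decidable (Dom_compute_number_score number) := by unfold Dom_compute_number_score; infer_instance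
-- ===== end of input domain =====

-- B replaces A's single stateful six-variable pass by independent rule-wise passes
-- (counts, an adjacent-pair zip, a run-length scan); same return value, no speed claim.

-- termination helper for the digit-extraction loops (cited by decreasing_by)
theorem pvDigits_dec (n : Int) (h : 0 < n) :
    (PySem.Int.floordiv n 10).toNat < n.toNat := by
  rw [PySem.Int.floordiv_eq_ediv_of_pos (by norm_num : (0:Int) < 10)]
  omega

-- ===== PORT A =====

-- while number > 0: digits.appendleft(number % 10); number //= 10
def pyDigitsA (n : Int) (acc : List Int) : List Int :=
  if _h : 0 < n then
    pyDigitsA (PySem.Int.floordiv n 10) (PySem.Int.mod n 10 :: acc)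
  else acc
termination_by n.toNat
decreasing_by exact pvDigits_dec n _h

-- the for-loop over range(len(digits)) with d = digits[i]; state is
-- (score, prev, first_three, end_three, first_seq, end_seq); the two trailing
-- 'score +=' lines after A's loop form the base case.
def pyLoopA (rest : List Int) (i : Int)
    (score prev ft et fs es : Int) : Int :=
  match rest with
  | [] => score + max 0 ((et - ft) * 4) + max 0 ((es - fs + 1) * (es - fs + 1))
  | d :: tl =>
    let score := if d = 5 then score + 2 else score
    let score := if PySem.Int.mod d 2 ≠ 0 then score + 1 else score
    let (score, ft, et) :=
      if d = 3 then
        (if prev ≠ 3 then (score, i, i) else (score, ft, i))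
      else if prev = 3 then
        (score + max 0 ((et - ft) * 4), i, i)
      else (score, i, i)
    let (score, fs, es) :=
      if i ≠ 0 then
        (if d = prev + 1 then (score, fs, i)
         else (score + max 0 ((es - fs + 1) * (es - fs + 1)), i, i))
      else (score, fs, es)
    pyLoopA tl (i + 1) score d ft et fs es

def compute_number_score (number : Int) : Int :=
  let digits := pyDigitsA number []
  let score : Int := if PySem.Int.mod number 5 = 0 then 6 else 0
  pyLoopA digits 0 score (-1) 0 0 0 0

-- ===== PORT B =====

-- while n > 0: digits.append(n % 10); n //= 10   (then digits.reverse())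
def pyDigitsB (n : Int) (acc : List Int) : List Int :=
  if _h : 0 < n then
    pyDigitsB (PySem.Int.floordiv n 10) (acc ++ [PySem.Int.mod n 10])
  else acc
termination_by n.toNat
decreasing_by exact pvDigits_dec n _h

-- for a, b in zip(digits, digits[1:]): run/total scan
def pyRunB (pairs : List (Int × Int)) (run total : Int) : Int × Int :=
  match pairs with
  | [] => (run, total)
  | (a, b) :: tl =>
    if b = a + 1 then pyRunB tl (run + 1) total
    else pyRunB tl 1 (total + run * run)

def compute_number_score_alt (number : Int) : Int :=
  let digits := (pyDigitsB number []).reverse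
  let score : Int := if PySem.Int.mod number 5 = 0 then 6 else 0
  let score := score + 2 * (PySem.List.count digits 5 : Int)
  let score := score + (digits.map (fun d => PySem.Int.mod d 2)).sum
  let score := score + 4 * (((digits.zip digits.tail).filter
      (fun p => p.1 == 3 && p.2 == 3)).length : Int)
  let rt := pyRunB (digits.zip digits.tail) 1 0
  score + rt.2 + rt.1 * rt.1

-- ===== PRECONDITION & SPEC =====
def Spec_compute_number_score (number : Int) (out : Int) : Prop := out = compute_number_score_alt number
instance (number : Int) (out : Int) : Decidable (Spec_compute_number_score number out) := by unfold Spec_compute_number_score; infer_instance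

-- ===== CLAIM (what is proved, stated in full; the proofs are below) =====
def Claim_equal_compute_number_score : Prop := ∀ (number : Int), Dom_compute_number_score number → Spec_compute_number_score number (compute_number_score number)

-- ===== LEMMAS AND PROOFS =====

-- per-digit points for rules 1 and 5
def pvPts (d : Int) : Int :=
  (if d = 5 then 2 else 0) + (if PySem.Int.mod d 2 ≠ 0 then 1 else 0)

-- combined contribution of the remaining digits, given the previous digit,
-- the pending trailing-3 credit c3 (= end_three - first_three) and the
-- current increasing-run length
def pvG (prev c3 run : Int) (rest : List Int) : Int :=
  match rest with
  | [] => 4 * c3 + run * run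
  | d :: tl =>
    pvPts d
      + (if d = 3 then 0 else if prev = 3 then 4 * c3 else 0)
      + (if d = prev + 1 then 0 else run * run)
      + pvG d (if d = 3 then (if prev = 3 then c3 + 1 else 0) else 0)
              (if d = prev + 1 then run + 1 else 1) tl

-- trailing-3 pair count along the list, seeded with prev
def pvP33 (prev : Int) (tl : List Int) : Int :=
  match tl with
  | [] => 0
  | d :: t => (if prev = 3 ∧ d = 3 then 1 else 0) + pvP33 d t

-- sum of squared increasing-run lengths, seeded with prev and current run
def pvSq (prev run : Int) (tl : List Int) : Int :=
  match tl with
  | [] => run * run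
  | d :: t => (if d = prev + 1 then 0 else run * run)
      + pvSq d (if d = prev + 1 then run + 1 else 1) t

-- A's loop equals score + pvG, under the loop invariant
theorem pyLoopA_eq_pvG (rest : List Int) :
    ∀ (i score prev ft et fs es : Int),
      et = i - 1 → 0 ≤ ft → ft ≤ et → (prev ≠ 3 → ft = et) →
      es = i - 1 → 0 ≤ fs → fs ≤ es →
      pyLoopA rest i score prev ft et fs es
        = score + pvG prev (et - ft) (es - fs + 1) rest := by
  induction rest with
  | nil =>
    intro i score prev ft et fs es h1 h2 h3 _ h5 h6 h7
    simp only [pyLoopA, pvG]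
    rw [max_eq_right (by omega : (0:Int) ≤ (et - ft) * 4),
        max_eq_right (mul_self_nonneg (es - fs + 1))]
    ring
  | cons d tl ih =>
    intro i score prev ft et fs es h1 h2 h3 h4 h5 h6 h7
    have hi : i ≠ 0 := by omega
    have hfac : ∀ (c : Prop) [Decidable c] (s k : Int),
        (if c then s + k else s) = s + (if c then k else 0) := by
      intro c _ s k; split_ifs <;> ring
    simp only [pyLoopA, pvG, pvPts, hfac]
    split_ifs <;>
      first
        | (exfalso; omega)
        | (dsimp only
           (rw [ih (i+1)] <;> try omega) <;>
           (try rw [max_eq_right (by omega : (0:Int) ≤ (et - ft) * 4)]) <;>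
           (try rw [max_eq_right (mul_self_nonneg (es - fs + 1))]) <;>
           (try rw [show i - ft = et - ft + 1 from by omega]) <;>
           (try rw [show i - i + 1 = (1:Int) from by omega]) <;>
           (try rw [show i - i = (0:Int) from by omega]) <;>
           (try rw [show i - fs + 1 = es - fs + 1 + 1 from by omega]) <;>
           (first | ring | omega))

-- pvG decomposes into per-rule sums when the pending credit matches prev
theorem pvG_decomp (rest : List Int) :
    ∀ (prev c3 run : Int), (prev ≠ 3 → c3 = 0) →
      pvG prev c3 run rest
        = (rest.map pvPts).sum + 4 * c3 + 4 * pvP33 prev rest + pvSq prev run rest := by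
  induction rest with
  | nil => intro prev c3 run _; simp only [pvG, pvP33, pvSq, List.map_nil, List.sum_nil]; ring
  | cons d tl ih =>
    intro prev c3 run hc
    simp only [pvG, pvP33, pvSq, List.map_cons, List.sum_cons]
    split_ifs <;>
      (rw [ih d] <;> try omega) <;>
      try first
        | ring
        | (rw [hc (by omega)]; ring)
        | (exfalso; omega)

theorem pvRun_eq_pvSq (tl : List Int) :
    ∀ (d run total : Int),
      (pyRunB ((d :: tl).zip tl) run total).2
        + (pyRunB ((d :: tl).zip tl) run total).1 * (pyRunB ((d :: tl).zip tl) run total).1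
        = total + pvSq d run tl := by
  induction tl with
  | nil => intro d run total; simp only [List.zip_nil_right, pyRunB, pvSq]; try ring
  | cons e t ih =>
    intro d run total
    simp only [List.zip_cons_cons, pyRunB, pvSq]
    split_ifs <;> rw [ih] <;> try ring

theorem pvZip_eq_pvP33 (tl : List Int) :
    ∀ (d : Int),
      ((((d :: tl).zip tl).filter (fun p => p.1 == 3 && p.2 == 3)).length : Int)
        = pvP33 d tl := by
  induction tl with
  | nil => intro d; simp [pvP33]
  | cons e t ih =>
    intro d
    have ihe := ih e
    simp only [List.zip_cons_cons, List.filter_cons, pvP33]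
    by_cases hd : d = 3 <;> by_cases he : e = 3 <;>
      simp [hd, he] at ihe ⊢ <;> omega

theorem pvPts_sum (ds : List Int) :
    (ds.map pvPts).sum
      = 2 * (PySem.List.count ds 5 : Int) + (ds.map (fun d => PySem.Int.mod d 2)).sum := by
  induction ds with
  | nil => simp [PySem.List.count]
  | cons d tl ih =>
    have hm : PySem.Int.mod d 2 = 0 ∨ PySem.Int.mod d 2 = 1 := by
      have h1 := PySem.Int.mod_nonneg (a := d) (b := 2) (by norm_num)
      have h2 := PySem.Int.mod_lt (a := d) (b := 2) (by norm_num)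
      omega
    simp only [List.map_cons, List.sum_cons, ih, pvPts, PySem.List.count, List.count_cons]
    by_cases hd : d = 5 <;> rcases hm with hm | hm <;>
      simp [hd, hm] <;> push_cast <;> try ring_nf <;> omega

-- the two digit loops build the same list
theorem pyDigitsB_reverse (n : Int) (acc : List Int) :
    (pyDigitsB n acc).reverse = pyDigitsA n acc.reverse := by
  induction n, acc using pyDigitsB.induct with
  | case1 n acc h ih =>
    rw [pyDigitsB, pyDigitsA, dif_pos h, dif_pos h]
    rw [show (acc ++ [PySem.Int.mod n 10]).reverse = PySem.Int.mod n 10 :: acc.reverse by simp] at ih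
    exact ih
  | case2 n acc h =>
    rw [pyDigitsB, pyDigitsA, dif_neg h, dif_neg h]

-- ===== VERDICT (by name: the statement is the Claim_ definition above) =====
theorem compute_number_score_spec : Claim_equal_compute_number_score := by
  intro number _
  unfold Spec_compute_number_score compute_number_score compute_number_score_alt
  have hds : (pyDigitsB number []).reverse = pyDigitsA number [] := by
    simpa using pyDigitsB_reverse number []
  rw [hds]
  set base : Int := if PySem.Int.mod number 5 = 0 then 6 else 0 with hbase
  cases hd : pyDigitsA number [] with
  | nil =>
    simp [pyLoopA, pyRunB, PySem.List.count]
  | cons d tl =>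
    have hfac : ∀ (c : Prop) [Decidable c] (s k : Int),
        (if c then s + k else s) = s + (if c then k else 0) := by
      intro c _ s k; split_ifs <;> ring
    have h0 : pyLoopA (d :: tl) 0 base (-1) 0 0 0 0
        = pyLoopA tl 1 (base + pvPts d) d 0 0 0 0 := by
      simp only [pyLoopA, pvPts, hfac]
      by_cases hd3 : d = 3 <;>
        simp [hd3] <;> ring_nf
    rw [h0, pyLoopA_eq_pvG tl 1 (base + pvPts d) d 0 0 0 0
      (by norm_num) (by norm_num) (by norm_num) (fun _ => rfl)
      (by norm_num) (by norm_num) (by norm_num)]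
    rw [show (0:Int) - 0 + 1 = 1 by norm_num, show (0:Int) - 0 = 0 by norm_num]
    rw [pvG_decomp tl d 0 1 (fun _ => rfl)]
    have hrun := pvRun_eq_pvSq tl d 1 0
    have hzip := pvZip_eq_pvP33 tl d
    have hpts := pvPts_sum (d :: tl)
    simp only [List.map_cons, List.sum_cons] at hpts ⊢
    dsimp only [List.tail_cons]
    linarith [hrun, hzip, hpts]
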